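-- pv_equiv track=rewrite | github.com/tvdmitrii/equation-solver-api | Grammar.py | collapse_curly_brackets
-- ===== SOURCE A (Python) =====
-- def collapse_curly_brackets(input):
--     output = []
--     indent = 0
--     i = -1
--     for line in input:
--         line = line.strip()
--         if not line:
--             continue
--
--         if indent == 0:
--             output.append(line)
--             i += 1
--         else:
--             output[i] += " " + line
--
--         if "{" in line:
--             indent += 1
--         if "}" in line:
--             indent -= 1
--
--     return output
-- ===== SOURCE B (Python) =====
-- def collapse_curly_brackets(input):
--     # Pass 1: strip every line and drop the empty ones.
--     cleaned = [s for s in (line.strip() for line in input) if s]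
--     # Pass 2: per-line brace delta, then the depth seen *before* each line.
--     deltas = [('{' in s) - ('}' in s) for s in cleaned]
--     indent_before = []
--     acc = 0
--     for d in deltas:
--         indent_before.append(acc)
--         acc += d
--     # Pass 3: group — depth 0 starts a new output line, otherwise join to the last.
--     groups = []
--     for s, ind in zip(cleaned, indent_before):
--         if ind == 0:
--             groups.append(s)
--         else:
--             groups[-1] = groups[-1] + " " + s
--     return groups
-- ===== Notes on version B (the rewrite author's own statement) =====
-- stated objective: alternative
-- what changed: Replaces A's single stateful scan (running indent counter plus an index into the growing output) with three separate passes: clean the lines, tabulate the brace depth before each line by prefix-summing per-line deltas, then group lines by whether that tabulated depth is zero.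
import Mathlib
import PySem

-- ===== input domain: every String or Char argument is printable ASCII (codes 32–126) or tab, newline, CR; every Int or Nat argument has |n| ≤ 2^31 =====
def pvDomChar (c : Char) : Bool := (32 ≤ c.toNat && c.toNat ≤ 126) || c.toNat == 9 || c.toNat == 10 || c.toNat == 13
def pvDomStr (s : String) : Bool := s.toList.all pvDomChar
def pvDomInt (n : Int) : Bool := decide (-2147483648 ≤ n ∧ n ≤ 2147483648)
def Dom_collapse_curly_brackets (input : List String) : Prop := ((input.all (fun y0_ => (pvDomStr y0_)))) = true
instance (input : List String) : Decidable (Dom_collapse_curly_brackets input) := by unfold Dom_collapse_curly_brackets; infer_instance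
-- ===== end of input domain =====

-- B replaces A's single stateful scan with three passes (clean, depth table by prefix sums, group); alternative decomposition, same cost.


-- ===== PORT A =====
-- one loop iteration of A; state = (output, indent, i).  output[i] is always in
-- range when the else-branch runs (indent ≠ 0 forces output ≠ []), so the total
-- forms pyGetD/pySetD are exact here.
def pvStepA (st : List String × Int × Int) (line0 : String) : List String × Int × Int :=
  let line := PySem.Str.strip line0
  if line = "" then st
  else
    let output := st.1
    let indent := st.2.1
    let i := st.2.2
    let oi : List String × Int :=
      if indent = 0 then (output ++ [line], i + 1)
      else (PySem.List.pySetD output i (PySem.List.pyGetD output i "" ++ " " ++ line), i)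
    let indent := if PySem.Str.isIn "{" line then indent + 1 else indent
    let indent := if PySem.Str.isIn "}" line then indent - 1 else indent
    (oi.1, indent, oi.2)

def collapse_curly_brackets (input : List String) : List String :=
  (input.foldl pvStepA ([], 0, -1)).1

-- ===== PORT B =====
def pvCleaned (input : List String) : List String :=
  (input.map PySem.Str.strip).filter (fun s => !(s == ""))

def pvDelta (s : String) : Int :=
  (if PySem.Str.isIn "{" s then 1 else 0) - (if PySem.Str.isIn "}" s then 1 else 0)

-- the 'indent_before' loop: appends acc, then adds the delta
def pvIndentBefore (deltas : List Int) : List Int :=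
  (deltas.foldl (fun (st : List Int × Int) d => (st.1 ++ [st.2], st.2 + d)) ([], 0)).1

-- the grouping loop over zip(cleaned, indent_before)
def pvGroupStep (groups : List String) (p : String × Int) : List String :=
  if p.2 = 0 then groups ++ [p.1]
  else PySem.List.pySetD groups (-1) (PySem.List.pyGetD groups (-1) "" ++ " " ++ p.1)

def collapse_curly_brackets_alt (input : List String) : List String :=
  ((pvCleaned input).zip (pvIndentBefore ((pvCleaned input).map pvDelta))).foldl pvGroupStep []

-- ===== PRECONDITION & SPEC =====
def Spec_collapse_curly_brackets (input : List String) (out : List String) : Prop := out = collapse_curly_brackets_alt input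
instance (input : List String) (out : List String) : Decidable (Spec_collapse_curly_brackets input out) := by unfold Spec_collapse_curly_brackets; infer_instance

-- ===== CLAIM (what is proved, stated in full; the proofs are below) =====
def Claim_equal_collapse_curly_brackets : Prop := ∀ (input : List String), Dom_collapse_curly_brackets input → Spec_collapse_curly_brackets input (collapse_curly_brackets input)

-- ===== LEMMAS AND PROOFS =====

-- A's core step on an already-cleaned line (no strip, no emptiness test)
def pvStepC (st : List String × Int × Int) (line : String) : List String × Int × Int :=
  let output := st.1
  let indent := st.2.1
  let i := st.2.2
  let oi : List String × Int :=
    if indent = 0 then (output ++ [line], i + 1)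
    else (PySem.List.pySetD output i (PySem.List.pyGetD output i "" ++ " " ++ line), i)
  let indent := if PySem.Str.isIn "{" line then indent + 1 else indent
  let indent := if PySem.Str.isIn "}" line then indent - 1 else indent
  (oi.1, indent, oi.2)

-- B's groups of an (already cleaned) list of lines
def pvG (L : List String) : List String :=
  (L.zip (pvIndentBefore (L.map pvDelta))).foldl pvGroupStep []

def pvAcc (L : List String) : Int := (L.map pvDelta).sum

lemma stepA_eq_stepC (st : List String × Int × Int) (line : String) :
    pvStepA st line =
      if PySem.Str.strip line = "" then st else pvStepC st (PySem.Str.strip line) := by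
  simp [pvStepA, pvStepC]

lemma foldl_stepA_eq_cleaned (input : List String) (st : List String × Int × Int) :
    input.foldl pvStepA st = (pvCleaned input).foldl pvStepC st := by
  induction input generalizing st with
  | nil => rfl
  | cons x xs ih =>
    simp only [List.foldl_cons, pvCleaned, List.map_cons, List.filter_cons]
    by_cases h : PySem.Str.strip x = ""
    · simp [h, stepA_eq_stepC, ih, pvCleaned]
    · have : (PySem.Str.strip x == "") = false := by simp [h]
      simp [this, h, stepA_eq_stepC, ih, pvCleaned]

lemma indentBefore_aux (deltas : List Int) (pre : List Int) (acc : Int) :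
    deltas.foldl (fun (st : List Int × Int) d => (st.1 ++ [st.2], st.2 + d)) (pre, acc) =
      (pre ++ (deltas.foldl (fun (st : List Int × Int) d => (st.1 ++ [st.2], st.2 + d)) ([], acc)).1,
       acc + deltas.sum) := by
  induction deltas generalizing pre acc with
  | nil => simp
  | cons d ds ih =>
    simp only [List.foldl_cons, List.nil_append]
    rw [ih (pre ++ [acc]) (acc + d), ih [acc] (acc + d)]
    simp only [Prod.mk.injEq, List.append_assoc, List.sum_cons]
    exact ⟨trivial, by omega⟩

lemma indentBefore_snoc (deltas : List Int) (d : Int) :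
    pvIndentBefore (deltas ++ [d]) = pvIndentBefore deltas ++ [deltas.sum] := by
  simp only [pvIndentBefore, List.foldl_append, List.foldl_cons, List.foldl_nil]
  rw [show (deltas.foldl (fun (st : List Int × Int) d => (st.1 ++ [st.2], st.2 + d)) ([], 0)) =
      (pvIndentBefore deltas, 0 + deltas.sum) from by
        have := indentBefore_aux deltas [] 0
        simpa [pvIndentBefore] using this]
  simp [pvIndentBefore]

lemma length_indentBefore (deltas : List Int) :
    (pvIndentBefore deltas).length = deltas.length := by
  induction deltas using List.reverseRecOn with
  | nil => rfl
  | append_singleton ds d ih => simp [indentBefore_snoc, ih]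

lemma pvG_snoc (L : List String) (x : String) :
    pvG (L ++ [x]) = pvGroupStep (pvG L) (x, pvAcc L) := by
  unfold pvG
  rw [show (L ++ [x]).map pvDelta = L.map pvDelta ++ [pvDelta x] from by simp]
  rw [indentBefore_snoc]
  rw [show (L ++ [x]).zip (pvIndentBefore (L.map pvDelta) ++ [(L.map pvDelta).sum]) =
      L.zip (pvIndentBefore (L.map pvDelta)) ++ [(x, (L.map pvDelta).sum)] from by
    rw [List.zip_append (by simp [length_indentBefore])]
    simp]
  simp [pvAcc]

lemma pvG_length_pos (L : List String) (h : L ≠ []) : pvG L ≠ [] := by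
  induction L using List.reverseRecOn with
  | nil => exact absurd rfl h
  | append_singleton ds d ih =>
    rw [pvG_snoc]
    unfold pvGroupStep
    by_cases h0 : pvAcc ds = 0
    · simp [h0]
    · simp only [h0, if_false]
      by_cases hds : ds = []
      · simp [hds, pvAcc] at h0
      · have hne := ih hds
        simp only [PySem.List.pySetD, PySem.List.pySet?]
        cases hIdx : PySem.List.pyIdx? (pvG ds).length (-1) with
        | none => simpa [hIdx] using hne
        | some k =>
          simp only [Option.map_some, Option.getD_some]
          exact List.ne_nil_of_length_pos (by simp [List.length_set]; exact List.length_pos_iff.mpr hne)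

lemma pyIdx_last (n : Nat) (h : 0 < n) :
    PySem.List.pyIdx? n ((n : Int) - 1) = some (n - 1) := by
  simp only [PySem.List.pyIdx?]
  split_ifs with h1 h2 h3
  · congr 1; omega
  · omega
  · exact absurd h1 (by omega)
  · omega

lemma pyIdx_neg_one (n : Nat) (h : 0 < n) :
    PySem.List.pyIdx? n (-1 : Int) = some (n - 1) := by
  simp only [PySem.List.pyIdx?, neg_neg, Int.toNat_one]
  split_ifs with h1 h2 h3
  · exact absurd h1 (by omega)
  · omega
  · congr 1
  · omega

lemma pySetD_neg_one (xs : List String) (h : xs ≠ []) (v : String) :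
    PySem.List.pySetD xs ((xs.length : Int) - 1) v = PySem.List.pySetD xs (-1) v := by
  have hlen : 0 < xs.length := List.length_pos_iff.mpr h
  simp only [PySem.List.pySetD, PySem.List.pySet?, pyIdx_last _ hlen, pyIdx_neg_one _ hlen]

lemma pyGetD_neg_one (xs : List String) (h : xs ≠ []) (d : String) :
    PySem.List.pyGetD xs ((xs.length : Int) - 1) d = PySem.List.pyGetD xs (-1) d := by
  have hlen : 0 < xs.length := List.length_pos_iff.mpr h
  simp only [PySem.List.pyGetD, PySem.List.pyGet?, pyIdx_last _ hlen, pyIdx_neg_one _ hlen]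

lemma main_invariant (L : List String) :
    L.foldl pvStepC ([], 0, -1) = (pvG L, pvAcc L, ((pvG L).length : Int) - 1) := by
  induction L using List.reverseRecOn with
  | nil => simp [pvG, pvAcc, pvIndentBefore]
  | append_singleton ds x ih =>
    rw [List.foldl_append, List.foldl_cons, List.foldl_nil, ih, pvG_snoc]
    unfold pvStepC pvGroupStep
    by_cases h0 : pvAcc ds = 0
    · simp only [h0, if_true, Prod.mk.injEq]
      refine ⟨by trivial, ?_, ?_⟩
      · simp only [pvAcc, pvDelta, List.map_append, List.map_cons, List.map_nil, List.sum_append,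
          List.sum_cons, List.sum_nil]
        have h0' : (ds.map pvDelta).sum = 0 := h0
        split_ifs <;> omega
      · simp only [List.length_append, List.length_cons, List.length_nil]
        push_cast
        omega
    · have hds : ds ≠ [] := by
        intro h; rw [h] at h0; exact h0 (by simp [pvAcc])
      have hne := pvG_length_pos ds hds
      simp only [h0, if_false, Prod.mk.injEq]
      refine ⟨?_, ?_, ?_⟩
      · rw [pySetD_neg_one _ hne, pyGetD_neg_one _ hne]
      · simp only [pvAcc, pvDelta, List.map_append, List.map_cons, List.map_nil, List.sum_append,
          List.sum_cons, List.sum_nil]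
        split_ifs <;> omega
      · rw [← pySetD_neg_one _ hne]
        simp [PySem.List.length_pySetD]

-- ===== VERDICT (by name: the statement is the Claim_ definition above) =====
theorem collapse_curly_brackets_spec : Claim_equal_collapse_curly_brackets := by
  intro input _
  unfold Spec_collapse_curly_brackets collapse_curly_brackets collapse_curly_brackets_alt
  rw [foldl_stepA_eq_cleaned, main_invariant]
  rfl
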